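-- pv_equiv track=rewrite | github.com/ip-oss/GuardianAI | gridworld_fingerprint/utils/observer_placement.py | count_zone_transitions
-- ===== SOURCE A (Python) =====
-- from typing import List, Tuple, Set, Dict, Any
--
-- def count_zone_transitions(
--     path: List[Tuple[int, int]],
--     observers: List[Tuple[int, int]],
--     radius: int
-- ) -> int:
--     """
--     Count number of observed/unobserved zone transitions in path.
--
--     A transition occurs when the agent moves from an observed cell to an
--     unobserved cell or vice versa. More transitions = more mode-switching
--     opportunities for deceptive agents.
--
--     Args:
--         path: List of (x, y) positions representing a path
--         observers: List of observer positions
--         radius: Detection radius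
--
--     Returns:
--         Number of zone transitions
--
--     Example:
--         >>> path = [(0,0), (1,1), (2,2), (3,3)]
--         >>> observers = [(1,1)]
--         >>> count_zone_transitions(path, observers, radius=1)
--         2  # Enter observed zone, then exit it
--     """
--     if len(path) < 2:
--         return 0
--
--     def is_observed(pos):
--         """Check if position is within radius of any observer."""
--         for obs in observers:
--             if abs(pos[0] - obs[0]) + abs(pos[1] - obs[1]) <= radius:
--                 return True
--         return False
--
--     transitions = 0
--     prev_state = is_observed(path[0])
--
--     for pos in path[1:]:
--         curr_state = is_observed(pos)
--         if curr_state != prev_state: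
--             transitions += 1
--         prev_state = curr_state
--
--     return transitions
-- ===== SOURCE B (Python) =====
-- def count_zone_transitions(path, observers, radius):
--     # Observer-major coverage pass: start from an all-False coverage bitmap over the
--     # path and let each observer OR in the cells it sees; then count adjacent flips.
--     covered = [False] * len(path)
--     for ox, oy in observers:
--         covered = [c or abs(x - ox) + abs(y - oy) <= radius
--                    for (x, y), c in zip(path, covered)]
--     return sum(a != b for a, b in zip(covered, covered[1:]))
-- ===== Notes on version B (the rewrite author's own statement) =====
-- stated objective: alternative
-- what changed: B inverts A's loops: instead of classifying each path point by scanning all observers inside a stateful prev/curr walk, it maintains a coverage bitmap over the whole path and makes one observer-major pass (each observer ORs in the cells it sees), then counts adjacent flips of the bitmap in a pairwise zip; what is maintained (a path-wide coverage vector vs a single previous-state flag) and the traversal order (observer-major vs point-major) both change.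
import Mathlib
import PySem

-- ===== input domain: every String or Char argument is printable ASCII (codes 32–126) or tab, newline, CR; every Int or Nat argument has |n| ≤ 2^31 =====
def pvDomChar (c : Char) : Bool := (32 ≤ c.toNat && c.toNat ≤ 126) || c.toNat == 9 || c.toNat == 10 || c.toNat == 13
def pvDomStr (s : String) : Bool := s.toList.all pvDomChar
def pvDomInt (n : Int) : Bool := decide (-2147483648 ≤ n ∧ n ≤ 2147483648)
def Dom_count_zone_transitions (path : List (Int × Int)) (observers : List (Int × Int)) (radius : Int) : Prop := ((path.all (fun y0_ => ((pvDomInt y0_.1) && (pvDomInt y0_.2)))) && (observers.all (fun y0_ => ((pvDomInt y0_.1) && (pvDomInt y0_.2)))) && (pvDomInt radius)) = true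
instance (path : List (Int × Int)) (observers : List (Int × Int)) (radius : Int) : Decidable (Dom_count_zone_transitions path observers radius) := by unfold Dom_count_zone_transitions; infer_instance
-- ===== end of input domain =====

-- B inverts A's loops: it maintains a coverage bitmap over the whole path, built by one
-- observer-major pass, then counts adjacent flips pairwise (objective: alternative).

-- ===== PORT A =====
-- A's inner helper `is_observed`: early-exit scan over observers
def czA_isObserved (observers : List (Int × Int)) (radius : Int) (pos : Int × Int) : Bool :=
  observers.any (fun obs => decide (|pos.1 - obs.1| + |pos.2 - obs.2| ≤ radius))

def count_zone_transitions (path : List (Int × Int)) (observers : List (Int × Int)) (radius : Int) : Int :=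
  if path.length < 2 then 0
  else
    match path with
    | [] => 0
    | p :: rest =>
      (rest.foldl
        (fun s pos =>
          let curr := czA_isObserved observers radius pos
          (curr, if curr != s.1 then s.2 + 1 else s.2))
        (czA_isObserved observers radius p, (0 : Int))).2

-- ===== PORT B =====
-- one observer's update of the coverage bitmap (B's inner comprehension)
def czB_update (radius : Int) (o : Int × Int) (path : List (Int × Int)) (cov : List Bool) : List Bool :=
  (path.zip cov).map (fun pc => pc.2 || decide (|pc.1.1 - o.1| + |pc.1.2 - o.2| ≤ radius))

def count_zone_transitions_alt (path : List (Int × Int)) (observers : List (Int × Int)) (radius : Int) : Int :=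
  let covered := observers.foldl (fun cov o => czB_update radius o path cov) (path.map (fun _ => false))
  (covered.zip covered.tail).foldl (fun acc p => if p.1 != p.2 then acc + 1 else acc) (0 : Int)

-- ===== PRECONDITION & SPEC =====
def Spec_count_zone_transitions (path : List (Int × Int)) (observers : List (Int × Int)) (radius : Int) (out : Int) : Prop := out = count_zone_transitions_alt path observers radius
instance (path : List (Int × Int)) (observers : List (Int × Int)) (radius : Int) (out : Int) : Decidable (Spec_count_zone_transitions path observers radius out) := by unfold Spec_count_zone_transitions; infer_instance

-- ===== CLAIM (what is proved, stated in full; the proofs are below) =====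
def Claim_equal_count_zone_transitions : Prop := ∀ (path : List (Int × Int)) (observers : List (Int × Int)) (radius : Int), Dom_count_zone_transitions path observers radius → Spec_count_zone_transitions path observers radius (count_zone_transitions path observers radius)

-- ===== LEMMAS AND PROOFS =====

-- one observer-major update step, expressed point-wise on a mapped bitmap
theorem czB_update_map (radius : Int) (o : Int × Int) (f : (Int × Int) → Bool) :
    ∀ (path : List (Int × Int)),
      czB_update radius o path (path.map f)
        = path.map (fun p => f p || decide (|p.1 - o.1| + |p.2 - o.2| ≤ radius)) := by
  intro path
  induction path with
  | nil => rfl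
  | cons p ps ih =>
    simp only [czB_update, List.map_cons, List.zip_cons_cons] at *
    rw [ih]

-- the whole observer-major fold: the bitmap ends up as A's point-wise classification
theorem czB_fold_map (radius : Int) :
    ∀ (observers : List (Int × Int)) (path : List (Int × Int)) (f : (Int × Int) → Bool),
      observers.foldl (fun cov o => czB_update radius o path cov) (path.map f)
        = path.map (fun p => f p || czA_isObserved observers radius p) := by
  intro observers
  induction observers with
  | nil => intro path f; simp [czA_isObserved]
  | cons o os ih =>
    intro path f
    simp only [List.foldl_cons]
    rw [czB_update_map, ih]
    apply List.map_congr_left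
    intro p _
    simp [czA_isObserved, Bool.or_assoc]

-- shifting the accumulator out of B's pairwise count
theorem pairFold_shift (l : List (Bool × Bool)) :
    ∀ (a : Int),
      l.foldl (fun acc p => if p.1 != p.2 then acc + 1 else acc) a
        = a + l.foldl (fun acc p => if p.1 != p.2 then acc + 1 else acc) 0 := by
  induction l with
  | nil => intro a; simp
  | cons p ps ih =>
    intro a
    simp only [List.foldl_cons]
    rw [ih, ih (if p.1 != p.2 then (0:Int) + 1 else 0)]
    split_ifs <;> ring

-- A's stateful prev/curr loop equals the pairwise zip count over the mapped state list
theorem pairCount_eq (observers : List (Int × Int)) (radius : Int) :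
    ∀ (rest : List (Int × Int)) (b : Bool) (t : Int),
      (rest.foldl
          (fun s pos =>
            let curr := czA_isObserved observers radius pos
            (curr, if curr != s.1 then s.2 + 1 else s.2))
          (b, t)).2
        = t + (((b :: rest.map (czA_isObserved observers radius)).zip
              (rest.map (czA_isObserved observers radius))).foldl
            (fun acc p => if p.1 != p.2 then acc + 1 else acc) 0) := by
  intro rest
  induction rest with
  | nil => intro b t; simp
  | cons q qs ih =>
    intro b t
    simp only [List.foldl_cons, List.map_cons, List.zip_cons_cons]
    rw [ih]
    rw [pairFold_shift
      (((czA_isObserved observers radius q :: qs.map (czA_isObserved observers radius)).zip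
        (qs.map (czA_isObserved observers radius))))
      (if (b != czA_isObserved observers radius q) then (0:Int) + 1 else 0)]
    have : (czA_isObserved observers radius q != b) = (b != czA_isObserved observers radius q) := by
      cases b <;> cases czA_isObserved observers radius q <;> decide
    rw [this]
    split_ifs <;> ring

theorem count_zone_transitions_spec' (path observers : List (Int × Int)) (radius : Int) :
    count_zone_transitions path observers radius = count_zone_transitions_alt path observers radius := by
  unfold count_zone_transitions count_zone_transitions_alt
  rw [czB_fold_map]
  simp only [Bool.false_or]
  match path with
  | [] => simp
  | [p] => simp
  | p :: q :: rest =>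
    have hlen : ¬ ((p :: q :: rest).length < 2) := by simp
    rw [if_neg hlen]
    simp only [List.map_cons, List.tail_cons]
    rw [pairCount_eq observers radius (q :: rest) (czA_isObserved observers radius p) 0]
    simp

-- ===== VERDICT (by name: the statement is the Claim_ definition above) =====
theorem count_zone_transitions_spec : Claim_equal_count_zone_transitions := by
  intro path observers radius _
  exact count_zone_transitions_spec' path observers radius
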